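-- pv_equiv track=rewrite | github.com/afterkita/Algoritm_lab_2 | main.py | comand_priority
-- ===== SOURCE A (Python) =====
-- def comand_priority(arr):
--     prior = 1
--     new_arr = []
--     for i in range(0,len(arr)):
--         if arr[i]== '(':
--             prior += 2
--             new_arr.append(0)
--         elif arr[i] == ')':
--             prior -= 2;
--             new_arr.append(0)
--         if arr[i].isdigit() == True:
--             new_arr.append(0)
--         elif arr[i]== '+' or arr[i]=='-':
--             new_arr.append(prior)
--         elif arr[i] == '*' or arr[i] == '/':
--             new_arr.append(prior+1)
--     return new_arr
-- ===== SOURCE B (Python) =====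
-- def comand_priority(arr):
--     # pass 1: depth[i] = 1 + 2*(net parentheses strictly before position i)
--     depth = [1]
--     for ch in arr:
--         depth.append(depth[-1] + (2 if ch == '(' else -2 if ch == ')' else 0))
--     # pass 2: map each character with its depth to its contribution
--     out = []
--     for ch, p in zip(arr, depth):
--         if ch in '()' or ch.isdigit():
--             out.append(0)
--         elif ch in '+-':
--             out.append(p)
--         elif ch in '*/':
--             out.append(p + 1)
--     return out
-- ===== Notes on version B (the rewrite author's own statement) =====
-- stated objective: alternative
-- what changed: B splits A's single loop (which threads the priority accumulator inline with the appends) into two passes: a prefix scan computing the running paren depth for every position, then a mapping pass over (char, depth) pairs producing the output.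
import Mathlib
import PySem

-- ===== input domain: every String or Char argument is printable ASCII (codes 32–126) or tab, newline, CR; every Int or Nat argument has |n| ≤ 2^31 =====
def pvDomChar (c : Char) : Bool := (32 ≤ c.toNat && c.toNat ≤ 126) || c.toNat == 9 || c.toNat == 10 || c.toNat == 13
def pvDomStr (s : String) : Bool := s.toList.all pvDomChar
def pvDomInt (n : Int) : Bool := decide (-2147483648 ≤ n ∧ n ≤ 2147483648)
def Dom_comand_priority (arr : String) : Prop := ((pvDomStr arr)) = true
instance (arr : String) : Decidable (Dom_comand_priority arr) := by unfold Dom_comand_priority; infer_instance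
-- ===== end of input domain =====

-- B separates the work into two passes (a depth prefix scan, then a mapping pass) instead of
-- A's single loop threading the priority accumulator inline; objective: alternative decomposition.

-- ===== PORT A =====
-- one loop step of A: paren branch updates prior and may append, then the digit/operator branch appends
def pvAStep (st : Int × List Int) (c : Char) : Int × List Int :=
  let st1 : Int × List Int :=
    if c = '(' then (st.1 + 2, st.2 ++ [0])
    else if c = ')' then (st.1 - 2, st.2 ++ [0])
    else st
  if PySem.Chars.isdigit c then (st1.1, st1.2 ++ [0])
  else if c = '+' ∨ c = '-' then (st1.1, st1.2 ++ [st1.1])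
  else if c = '*' ∨ c = '/' then (st1.1, st1.2 ++ [st1.1 + 1])
  else st1

def comand_priority (arr : String) : List Int :=
  (arr.toList.foldl pvAStep (1, [])).2

-- ===== PORT B =====
-- pass 1: the running-depth list (depth[-1] loop = scanl)
def pvDelta (c : Char) : Int := if c = '(' then 2 else if c = ')' then -2 else 0

def pvDepths (l : List Char) : List Int := List.scanl (fun p c => p + pvDelta c) 1 l

-- pass 2: map each (char, depth) pair to its contribution
def pvBStep (out : List Int) (cp : Char × Int) : List Int :=
  if cp.1 = '(' ∨ cp.1 = ')' ∨ PySem.Chars.isdigit cp.1 then out ++ [0]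
  else if cp.1 = '+' ∨ cp.1 = '-' then out ++ [cp.2]
  else if cp.1 = '*' ∨ cp.1 = '/' then out ++ [cp.2 + 1]
  else out

def comand_priority_alt (arr : String) : List Int :=
  (arr.toList.zip (pvDepths arr.toList)).foldl pvBStep []

-- ===== PRECONDITION & SPEC =====
def Spec_comand_priority (arr : String) (out : List Int) : Prop := out = comand_priority_alt arr
instance (arr : String) (out : List Int) : Decidable (Spec_comand_priority arr out) := by unfold Spec_comand_priority; infer_instance

-- ===== CLAIM (what is proved, stated in full; the proofs are below) =====
def Claim_equal_comand_priority : Prop := ∀ (arr : String), Dom_comand_priority arr → Spec_comand_priority arr (comand_priority arr)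

-- ===== LEMMAS AND PROOFS =====

-- common specification of both loops
def pvContrib (c : Char) (p : Int) : List Int :=
  if c = '(' ∨ c = ')' ∨ PySem.Chars.isdigit c then [0]
  else if c = '+' ∨ c = '-' then [p]
  else if c = '*' ∨ c = '/' then [p + 1]
  else []

def pvG : List Char → Int → List Int
  | [], _ => []
  | c :: l, p => pvContrib c p ++ pvG l (p + pvDelta c)

lemma pvAStep_eq (st : Int × List Int) (c : Char) :
    pvAStep st c = (st.1 + pvDelta c, st.2 ++ pvContrib c st.1) := by
  have hdig : ∀ d : Char, PySem.Chars.isdigit d = true → d ≠ '(' ∧ d ≠ ')' ∧ d ≠ '+' ∧ d ≠ '-' ∧ d ≠ '*' ∧ d ≠ '/' := by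
    intro d hd
    refine ⟨?_, ?_, ?_, ?_, ?_, ?_⟩ <;> rintro rfl <;> simp [PySem.Chars.isdigit] at hd
  unfold pvAStep pvContrib pvDelta
  by_cases h1 : c = '('
  · subst h1; simp [PySem.Chars.isdigit]
  · by_cases h2 : c = ')'
    · subst h2; simp [PySem.Chars.isdigit, sub_eq_add_neg]
    · by_cases hd : PySem.Chars.isdigit c
      · simp [h1, h2, hd]
      · split_ifs <;> simp_all

lemma pvA_run (l : List Char) (p : Int) (acc : List Int) :
    (l.foldl pvAStep (p, acc)).2 = acc ++ pvG l p := by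
  induction l generalizing p acc with
  | nil => simp [pvG]
  | cons c l ih =>
      simp only [List.foldl_cons, pvAStep_eq, pvG]
      rw [ih]
      simp

lemma pvB_run (l : List Char) (p : Int) (acc : List Int) :
    ((l.zip (List.scanl (fun q c => q + pvDelta c) p l)).foldl pvBStep acc) = acc ++ pvG l p := by
  induction l generalizing p acc with
  | nil => simp [pvG]
  | cons c l ih =>
      simp only [List.scanl_cons, List.zip_cons_cons, List.foldl_cons, pvG]
      rw [ih]
      unfold pvBStep pvContrib
      by_cases h1 : c = '(' ∨ c = ')' ∨ PySem.Chars.isdigit c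
      · simp [h1]
      · by_cases h2 : c = '+' ∨ c = '-'
        · simp [h1, h2]
        · by_cases h3 : c = '*' ∨ c = '/'
          · simp [h1, h2, h3]
          · simp [h1, h2, h3]

-- ===== VERDICT (by name: the statement is the Claim_ definition above) =====
theorem comand_priority_spec : Claim_equal_comand_priority := by
  intro arr _
  unfold Spec_comand_priority comand_priority comand_priority_alt pvDepths
  rw [pvA_run, pvB_run]
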